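-- pv_equiv track=rewrite | github.com/Futen/Dash_Cam_2016 | lib_RunOSM.py | GetIntersectionID
-- ===== SOURCE A (Python) =====
-- def Recursive(data, last_id, now_id, signal_lst):
--     now_len = len(data[now_id]['connect'])
--     #print now_id
--     if now_id in signal_lst or now_len >= 3 or now_len == 1:
--         return now_id
--     else:
--         for index,point in enumerate(data[now_id]['connect']):
--             if point['id'] != last_id:
--                 next_id = point['id']
--         return Recursive(data, now_id, next_id, signal_lst)
--
-- def GetIntersectionID(point1_id, point2_id, data, signal_lst):
--     output1_id = ''
--     output2_id = ''
--     if not point1_id in signal_lst and not len(data[point1_id]['connect']) >= 3 and not len(data[point1_id]['connect']) == 1: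
--         for index,point in enumerate(data[point1_id]['connect']):
--             if point['id'] != point2_id:
--                 next_id = point['id']
--                 #print next_id
--         output1_id = Recursive(data, point1_id, next_id, signal_lst)
--     else:
--         output1_id = point1_id
--     if not point2_id in signal_lst and not len(data[point2_id]['connect']) >= 3 and not len(data[point2_id]['connect']) == 1:
--         for index,point in enumerate(data[point2_id]['connect']):
--             if point['id'] != point1_id:
--                 next_id = point['id']
--         output2_id = Recursive(data, point2_id, next_id, signal_lst)
--     else:
--         output2_id = point2_id
--     return (output1_id, output2_id)
-- ===== SOURCE B (Python) =====
-- def GetIntersectionID(point1_id, point2_id, data, signal_lst):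
--     def walk(last_id, now_id):
--         while now_id not in signal_lst:
--             connect = data[now_id]['connect']
--             if len(connect) == 1 or len(connect) >= 3:
--                 break
--             last_id, now_id = now_id, next(p['id'] for p in reversed(connect) if p['id'] != last_id)
--         return now_id
--     return (walk(point2_id, point1_id), walk(point1_id, point2_id))
-- ===== Notes on version B (the rewrite author's own statement) =====
-- stated objective: simpler
-- what changed: The recursive Recursive helper plus two duplicated guard-and-scan branches are replaced by one shared iterative walk(last_id, now_id) with a while loop that picks the next node as the first eligible neighbor of the reversed connect list, called once per endpoint.
import Mathlib
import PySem

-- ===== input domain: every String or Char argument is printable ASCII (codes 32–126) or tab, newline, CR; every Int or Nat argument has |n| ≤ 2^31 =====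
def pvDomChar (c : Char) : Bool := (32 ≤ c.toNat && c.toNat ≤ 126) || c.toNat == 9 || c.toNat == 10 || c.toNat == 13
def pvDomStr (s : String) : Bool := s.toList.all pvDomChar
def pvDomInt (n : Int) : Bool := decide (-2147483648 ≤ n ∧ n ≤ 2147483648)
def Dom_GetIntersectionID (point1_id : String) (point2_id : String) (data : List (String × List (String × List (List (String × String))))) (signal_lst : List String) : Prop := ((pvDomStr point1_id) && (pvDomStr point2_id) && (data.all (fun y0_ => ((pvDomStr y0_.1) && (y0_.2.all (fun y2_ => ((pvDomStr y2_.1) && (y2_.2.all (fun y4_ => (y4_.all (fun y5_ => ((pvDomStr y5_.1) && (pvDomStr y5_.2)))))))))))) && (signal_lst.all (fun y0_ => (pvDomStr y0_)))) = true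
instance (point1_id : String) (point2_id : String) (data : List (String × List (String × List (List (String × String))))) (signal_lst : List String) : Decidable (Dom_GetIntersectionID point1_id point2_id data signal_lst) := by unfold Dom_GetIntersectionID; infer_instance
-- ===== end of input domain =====

-- B replaces A's recursive helper and its two duplicated guard-and-scan branches by ONE iterative
-- walk (last_id, now_id) shared by both endpoints; objective: simpler.

-- first-match lookup on the raw association-list arguments (the dict convention for these inputs)
def pvLookup {α : Type} (l : List (String × α)) (k : String) : Option α :=
  (l.find? (fun kv => kv.1 == k)).map Prod.snd

-- data[k]['connect']  (none exactly where Python raises KeyError)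
def pvConnect (data : List (String × List (String × List (List (String × String))))) (k : String) : Option (List (List (String × String))) :=
  (pvLookup data k).bind (fun v => pvLookup v "connect")

-- ===== PORT A =====
-- the for-loop 'for point in connect: if point['id'] != last: next_id = point['id']' (last match wins);
-- a point without an 'id' key makes Python raise (outside Pre_): the fold skips it
def pvLastEligible (c : List (List (String × String))) (last : String) : Option String :=
  c.foldl (fun acc p =>
    match pvLookup p "id" with
    | some i => if i != last then some i else acc
    | none => acc) none

-- Recursive(data, last_id, now_id, signal_lst); fuel makes it total, "" marks states where Python raises
def pvRecursive (data : List (String × List (String × List (List (String × String))))) (signal_lst : List String) : Nat → String → String → String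
  | 0, _, _ => ""
  | f + 1, last, now =>
    match pvConnect data now with
    | none => ""          -- KeyError
    | some c =>
      if signal_lst.contains now = true ∨ 3 ≤ c.length ∨ c.length = 1 then now
      else
        match pvLastEligible c last with
        | none => ""      -- NameError
        | some nx => pvRecursive data signal_lst f now nx

-- one branch of GetIntersectionID's body (guard, scan avoiding the other endpoint, then Recursive)
def pvEndpointA (data : List (String × List (String × List (List (String × String))))) (signal_lst : List String) (p other : String) : String :=
  if signal_lst.contains p = true then p
  else
    match pvConnect data p with
    | none => ""          -- KeyError
    | some c =>
      if 3 ≤ c.length ∨ c.length = 1 then p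
      else
        match pvLastEligible c other with
        | none => ""      -- NameError (or Python's stale next_id from the first branch: outside Pre_)
        | some nx => pvRecursive data signal_lst (data.length + 2) p nx

def GetIntersectionID (point1_id : String) (point2_id : String) (data : List (String × List (String × List (List (String × String))))) (signal_lst : List String) : String × String :=
  (pvEndpointA data signal_lst point1_id point2_id, pvEndpointA data signal_lst point2_id point1_id)

-- ===== PORT B =====
-- next(p['id'] for p in reversed(connect) if p['id'] != last_id)
def pvFirstEligible (c : List (List (String × String))) (last : String) : Option String :=
  (c.reverse.find? (fun p =>
    match pvLookup p "id" with
    | some i => i != last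
    | none => false)).bind (fun p => pvLookup p "id")

-- the while loop of walk(last_id, now_id); fuel makes it total, "" marks states where Python raises
def pvWalk (data : List (String × List (String × List (List (String × String))))) (signal_lst : List String) : Nat → String → String → String
  | 0, _, _ => ""
  | f + 1, last, now =>
    if signal_lst.contains now = true then now
    else
      match pvConnect data now with
      | none => ""        -- KeyError
      | some c =>
        if c.length = 1 ∨ 3 ≤ c.length then now
        else
          match pvFirstEligible c last with
          | none => ""    -- StopIteration
          | some nx => pvWalk data signal_lst f now nx

def GetIntersectionID_alt (point1_id : String) (point2_id : String) (data : List (String × List (String × List (List (String × String))))) (signal_lst : List String) : String × String :=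
  (pvWalk data signal_lst (data.length + 3) point2_id point1_id,
   pvWalk data signal_lst (data.length + 3) point1_id point2_id)

-- ===== PRECONDITION & SPEC =====
-- points of a connect list: 'id' present and naming a node that itself has a 'connect' list
def pvPointOK (data : List (String × List (String × List (List (String × String))))) (p : List (String × String)) : Bool :=
  match pvLookup p "id" with
  | none => false
  | some i => (pvConnect data i).isSome

def pvEntryOK (data : List (String × List (String × List (List (String × String))))) (kv : String × List (String × List (List (String × String)))) : Bool :=
  match pvLookup kv.2 "connect" with
  | none => false
  | some c =>
    decide (c.length ≠ 0) && c.all (pvPointOK data) &&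
      (match c with
       | [p, q] => decide (pvLookup p "id" ≠ pvLookup q "id")
       | _ => true)

def pvWF (data : List (String × List (String × List (List (String × String))))) : Bool :=
  data.all (pvEntryOK data)

def pvDeg2 (data : List (String × List (String × List (List (String × String))))) (k : String) : Bool :=
  match pvConnect data k with
  | some c => c.length == 2
  | none => false

def pvSuccs (data : List (String × List (String × List (List (String × String))))) (k : String) : List String :=
  match pvConnect data k with
  | some c => c.filterMap (fun p => pvLookup p "id")
  | none => []

-- the directed graph on degree-2 nodes has no cycle (so A's walk terminates): repeatedly discard
-- nodes with no remaining degree-2 successor; acyclic iff nothing survives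
def pvAcyclic (data : List (String × List (String × List (List (String × String))))) : Bool :=
  ((fun S => S.filter (fun k => (pvSuccs data k).any (fun i => pvDeg2 data i && S.contains i)))^[data.length + 1]
    ((data.map Prod.fst).filter (fun k => pvDeg2 data k))).isEmpty

-- every association list reaching the ports must have pairwise-distinct keys (a Python dict cannot
-- carry duplicates, so a duplicate-keyed input is a representation corner nothing should be claimed on)
def pvDictsOK (data : List (String × List (String × List (List (String × String))))) : Bool :=
  decide (data.map Prod.fst).Nodup &&
    data.all (fun kv => decide (kv.2.map Prod.fst).Nodup &&
      kv.2.all (fun cv => cv.2.all (fun pt => decide (pt.map Prod.fst).Nodup)))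

def pvEndpointOK (data : List (String × List (String × List (List (String × String))))) (signal_lst : List String) (p : String) : Bool :=
  signal_lst.contains p ||
  (pvDictsOK data &&
    match pvConnect data p with
    | none => false
    | some c => c.length == 1 || decide (3 ≤ c.length) || (pvWF data && pvAcyclic data))

-- Each endpoint is a signal / terminal node, or else the whole data is a well-formed acyclic chain
-- graph (every entry has a nonempty 'connect' of points with 'id' keys naming nodes of data, the two
-- ids of a degree-2 node distinct, no degree-2 cycle) with duplicate-free keys in every association
-- list (a Python dict cannot carry duplicate keys).  This excludes every input where A raises
-- (KeyError / NameError / RecursionError) and also some inputs where A still returns: walks over data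
-- with an unreachable malformed or duplicate-id entry (B agrees there), and the inputs where A's
-- second branch reuses the stale next_id left by the first branch (B raises StopIteration there).
def Pre_GetIntersectionID (point1_id : String) (point2_id : String) (data : List (String × List (String × List (List (String × String))))) (signal_lst : List String) : Prop :=
  (pvEndpointOK data signal_lst point1_id && pvEndpointOK data signal_lst point2_id) = true

instance (point1_id : String) (point2_id : String) (data : List (String × List (String × List (List (String × String))))) (signal_lst : List String) : Decidable (Pre_GetIntersectionID point1_id point2_id data signal_lst) := by
  unfold Pre_GetIntersectionID; infer_instance

def pvWitness_GetIntersectionID : String × String × (List (String × List (String × List (List (String × String))))) × List String :=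
  ("a", "b", [("a", [("connect", [[("id", "b")]])]), ("b", [("connect", [[("id", "a")]])])], [])

def Spec_GetIntersectionID (point1_id : String) (point2_id : String) (data : List (String × List (String × List (List (String × String))))) (signal_lst : List String) (out : String × String) : Prop := out = GetIntersectionID_alt point1_id point2_id data signal_lst
instance (point1_id : String) (point2_id : String) (data : List (String × List (String × List (List (String × String))))) (signal_lst : List String) (out : String × String) : Decidable (Spec_GetIntersectionID point1_id point2_id data signal_lst out) := by unfold Spec_GetIntersectionID; infer_instance

-- ===== CLAIM (what is proved, stated in full; the proofs are below) =====
def Claim_equal_GetIntersectionID : Prop := ∀ (point1_id : String) (point2_id : String) (data : List (String × List (String × List (List (String × String))))) (signal_lst : List String), Dom_GetIntersectionID point1_id point2_id data signal_lst → Pre_GetIntersectionID point1_id point2_id data signal_lst → Spec_GetIntersectionID point1_id point2_id data signal_lst (GetIntersectionID point1_id point2_id data signal_lst)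

-- ===== LEMMAS AND PROOFS =====

theorem pvWitness_ok :
    Dom_GetIntersectionID pvWitness_GetIntersectionID.1 pvWitness_GetIntersectionID.2.1 pvWitness_GetIntersectionID.2.2.1 pvWitness_GetIntersectionID.2.2.2 ∧
    Pre_GetIntersectionID pvWitness_GetIntersectionID.1 pvWitness_GetIntersectionID.2.1 pvWitness_GetIntersectionID.2.2.1 pvWitness_GetIntersectionID.2.2.2 := by
  decide

theorem pvLookup_mem {α : Type} (l : List (String × α)) (k : String) (v : α)
    (h : pvLookup l k = some v) : (k, v) ∈ l := by
  unfold pvLookup at h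
  cases hf : l.find? (fun kv => kv.1 == k) with
  | none => rw [hf] at h; simp at h
  | some kv =>
    rw [hf] at h
    have hk : kv.1 = k := by simpa using List.find?_some hf
    have hv : kv.2 = v := by simpa using h
    have : kv ∈ l := List.mem_of_find?_eq_some hf
    rwa [show (k, v) = kv by rw [← hk, ← hv]]

-- one-step unfolding of the two loops (kept as rfl-lemmas so rewriting is one layer at a time)
theorem pvRecursive_succ (data : List (String × List (String × List (List (String × String)))))
    (signal_lst : List String) (f : Nat) (last now : String) :
    pvRecursive data signal_lst (f + 1) last now =
      match pvConnect data now with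
      | none => ""
      | some c =>
        if signal_lst.contains now = true ∨ 3 ≤ c.length ∨ c.length = 1 then now
        else
          match pvLastEligible c last with
          | none => ""
          | some nx => pvRecursive data signal_lst f now nx := rfl

theorem pvWalk_succ (data : List (String × List (String × List (List (String × String)))))
    (signal_lst : List String) (f : Nat) (last now : String) :
    pvWalk data signal_lst (f + 1) last now =
      if signal_lst.contains now = true then now
      else
        match pvConnect data now with
        | none => ""
        | some c =>
          if c.length = 1 ∨ 3 ≤ c.length then now
          else
            match pvFirstEligible c last with
            | none => ""
            | some nx => pvWalk data signal_lst f now nx := rfl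

-- A's last-match scan = B's first-match scan over the reversed list
theorem elig_fold (last : String) (c : List (List (String × String))) (acc : Option String) :
    c.foldl (fun acc p =>
      match pvLookup p "id" with
      | some i => if i != last then some i else acc
      | none => acc) acc
    = match c.reverse.find? (fun p =>
        match pvLookup p "id" with
        | some i => i != last
        | none => false) with
      | some p => pvLookup p "id"
      | none => acc := by
  induction c generalizing acc with
  | nil => simp
  | cons p t ih =>
    simp only [List.foldl_cons, List.reverse_cons, List.find?_append, ih]
    cases hf : t.reverse.find? (fun p =>
        match pvLookup p "id" with
        | some i => i != last
        | none => false) with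
    | some q => simp
    | none =>
      simp only [Option.none_or]
      cases hid : pvLookup p "id" with
      | none => simp [List.find?, hid]
      | some i =>
        by_cases hne : i != last
        · simp [List.find?, hid, hne]
        · simp [List.find?, hid, hne]

theorem lastEligible_eq (c : List (List (String × String))) (last : String) :
    pvLastEligible c last = pvFirstEligible c last := by
  unfold pvLastEligible pvFirstEligible
  rw [elig_fold]
  cases hf : c.reverse.find? (fun p =>
      match pvLookup p "id" with
      | some i => i != last
      | none => false) with
  | some q => simp
  | none => simp

-- well-formedness propagates along one step of the walk
theorem wf_next (data : List (String × List (String × List (List (String × String)))))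
    (hwf : pvWF data = true) {now : String} {c : List (List (String × String))}
    (hc : pvConnect data now = some c) {p : List (String × String)} (hp : p ∈ c)
    {nx : String} (hid : pvLookup p "id" = some nx) :
    (pvConnect data nx).isSome := by
  unfold pvConnect at hc
  cases hv : pvLookup data now with
  | none => rw [hv] at hc; simp at hc
  | some v =>
    rw [hv, Option.bind_some] at hc
    have hmem : (now, v) ∈ data := pvLookup_mem _ _ _ hv
    have hentry := List.all_eq_true.mp hwf _ hmem
    unfold pvEntryOK at hentry
    rw [hc] at hentry
    simp only [Bool.and_eq_true] at hentry
    have hpok := List.all_eq_true.mp hentry.1.2 _ hp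
    unfold pvPointOK at hpok
    rw [hid] at hpok
    exact hpok

-- the eligible neighbor comes from the connect list
theorem firstEligible_mem (c : List (List (String × String))) (last : String) {nx : String}
    (h : pvFirstEligible c last = some nx) :
    ∃ p ∈ c, pvLookup p "id" = some nx := by
  unfold pvFirstEligible at h
  cases hf : c.reverse.find? (fun p =>
      match pvLookup p "id" with
      | some i => i != last
      | none => false) with
  | none => rw [hf] at h; simp at h
  | some p =>
    rw [hf, Option.bind_some] at h
    exact ⟨p, List.mem_reverse.mp (List.mem_of_find?_eq_some hf), h⟩

-- core: on well-formed data the recursive helper and the iterative walk agree, fuel for fuel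
theorem rec_eq_walk (data : List (String × List (String × List (List (String × String)))))
    (signal_lst : List String) (hwf : pvWF data = true) :
    ∀ (f : Nat) (last now : String), (pvConnect data now).isSome →
      pvRecursive data signal_lst f last now = pvWalk data signal_lst f last now := by
  intro f
  induction f with
  | zero => intro last now _; rfl
  | succ f ih =>
    intro last now hsome
    cases hc : pvConnect data now with
    | none => rw [hc] at hsome; simp at hsome
    | some c =>
      rw [pvRecursive_succ, pvWalk_succ, hc]
      dsimp only
      by_cases hs : signal_lst.contains now = true
      · rw [if_pos (Or.inl hs), if_pos hs]
      · rw [if_neg hs]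
        by_cases hterm : c.length = 1 ∨ 3 ≤ c.length
        · rw [if_pos (Or.inr (Or.symm hterm)), if_pos hterm]
        · rw [if_neg (by rintro (h | h | h) <;> [exact hs h; exact hterm (Or.inr h); exact hterm (Or.inl h)]),
              if_neg hterm, lastEligible_eq]
          cases hnx : pvFirstEligible c last with
          | none => rfl
          | some nx =>
            obtain ⟨p, hp, hid⟩ := firstEligible_mem c last hnx
            exact ih now nx (wf_next data hwf hc hp hid)

-- one endpoint: A's branch equals B's walk started with the other endpoint as last_id
theorem endpoint_eq (data : List (String × List (String × List (List (String × String)))))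
    (signal_lst : List String) (p other : String)
    (hok : pvEndpointOK data signal_lst p = true) :
    pvEndpointA data signal_lst p other = pvWalk data signal_lst (data.length + 3) other p := by
  unfold pvEndpointOK at hok
  rw [pvWalk_succ]
  unfold pvEndpointA
  by_cases hs : signal_lst.contains p = true
  · rw [if_pos hs, if_pos hs]
  · rw [if_neg hs, if_neg hs]
    rw [Bool.or_eq_true] at hok
    rcases hok with hok | hok
    · exact absurd hok hs
    rw [Bool.and_eq_true] at hok
    replace hok := hok.2
    cases hc : pvConnect data p with
    | none => rw [hc] at hok
    | some c =>
      rw [hc] at hok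
      dsimp only at hok ⊢
      by_cases hterm : c.length = 1 ∨ 3 ≤ c.length
      · rw [if_pos (Or.symm hterm), if_pos hterm]
      · rw [if_neg (fun h => hterm (Or.symm h)), if_neg hterm]
        have hwf : pvWF data = true := by
          rw [Bool.or_eq_true, Bool.or_eq_true, Bool.and_eq_true] at hok
          rcases hok with (h1 | h3) | h4
          · exact absurd (Or.inl ((by simpa using h1))) hterm
          · exact absurd (Or.inr (of_decide_eq_true h3)) hterm
          · exact h4.1
        rw [lastEligible_eq]
        cases hnx : pvFirstEligible c other with
        | none => rfl
        | some nx =>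
          obtain ⟨q, hq, hid⟩ := firstEligible_mem c other hnx
          exact rec_eq_walk data signal_lst hwf (data.length + 2) p nx (wf_next data hwf hc hq hid)

-- ===== VERDICT (by name: the statement is the Claim_ definition above) =====
theorem GetIntersectionID_spec : Claim_equal_GetIntersectionID := by
  intro p1 p2 data signal _ hpre
  unfold Pre_GetIntersectionID at hpre
  rw [Bool.and_eq_true] at hpre
  show _ = _
  unfold GetIntersectionID GetIntersectionID_alt
  rw [endpoint_eq data signal p1 p2 hpre.1, endpoint_eq data signal p2 p1 hpre.2]
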